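-- pv_equiv track=rewrite | github.com/wyk18703232953/myResearch | codeComplex/data/filteredData/python/quadratic/python_quadratic_0201.py | generate_input
-- ===== SOURCE A (Python) =====
-- def generate_input(n_scale):
--     # 设定行数为 n_scale，列数为 n_scale+1，保证 m >= 1
--     n = max(1, n_scale)
--     m = n + 1
--     a = []
--     for i in range(n):
--         # 生成一个确定性的二进制串，长度为 m
--         # 第 i 行第 j 位为 ((i + j) % 2)
--         bits = ''.join('1' if (i + j) % 2 == 0 else '0' for j in range(m))
--         a.append(int(bits, 2))
--     return n, m, a
-- ===== SOURCE B (Python) =====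
-- def generate_input(n_scale):
--     # Only two distinct row values exist (parity of i); compute the even-row
--     # integer in closed form and derive the odd-row value by a right shift.
--     n = max(1, n_scale)
--     m = n + 1
--     K = (m + 1) // 2                      # number of set bits in the even row
--     v_even = (((1 << (2 * K)) - 1) // 3) << ((m - 1) % 2)
--     v_odd = v_even >> 1
--     a = [v_even if i % 2 == 0 else v_odd for i in range(n)]
--     return n, m, a
-- ===== Notes on version B (the rewrite author's own statement) =====
-- stated objective: faster
-- what changed: Instead of building an m-character bit string per row and parsing it with int(.,2), B computes the single even-row integer by a closed-form geometric-sum formula, gets the odd-row value as a right shift, and fills the list with just those two values by parity of i.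
import Mathlib
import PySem

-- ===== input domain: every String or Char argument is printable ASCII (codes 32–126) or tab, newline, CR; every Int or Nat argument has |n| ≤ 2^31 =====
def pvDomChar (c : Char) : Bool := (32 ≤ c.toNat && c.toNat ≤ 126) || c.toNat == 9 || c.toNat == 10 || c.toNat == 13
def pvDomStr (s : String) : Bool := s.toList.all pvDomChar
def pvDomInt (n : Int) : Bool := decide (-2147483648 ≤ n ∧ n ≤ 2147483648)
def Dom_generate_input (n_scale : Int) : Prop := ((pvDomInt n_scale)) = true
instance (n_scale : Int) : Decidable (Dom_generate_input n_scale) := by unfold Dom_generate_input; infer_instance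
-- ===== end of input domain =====

-- B replaces the per-row bit-string construction + int(.,2) parse by a closed-form
-- formula for the two distinct row values (objective: faster).

-- ===== PORT A =====
-- int(bits, 2) ported by hand, step for step; exact for strings over '0'/'1',
-- which is all this code ever produces.
def pvInt2 (bits : List Char) : Int :=
  bits.foldl (fun acc c => acc * 2 + (if c == '1' then 1 else 0)) 0

def generate_input (n_scale : Int) : Int × Int × List Int :=
  let n := max 1 n_scale
  let m := n + 1
  let a := (PySem.List.pyRange 0 n 1).foldl (fun a i =>
    let bits := (PySem.List.pyRange 0 m 1).map
      (fun j => if PySem.Int.mod (i + j) 2 == 0 then '1' else '0')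
    a ++ [pvInt2 bits]) ([] : List Int)
  (n, m, a)

-- ===== PORT B =====
def generate_input_alt (n_scale : Int) : Int × Int × List Int :=
  let n := max 1 n_scale
  let m := n + 1
  let K := PySem.Int.floordiv (m + 1) 2
  let v_even := PySem.Int.floordiv (2 ^ (2 * K).toNat - 1) 3 * 2 ^ (PySem.Int.mod (m - 1) 2).toNat
  let v_odd := PySem.Int.floordiv v_even 2
  let a := (PySem.List.pyRange 0 n 1).map
    (fun i => if PySem.Int.mod i 2 == 0 then v_even else v_odd)
  (n, m, a)

-- ===== PRECONDITION & SPEC =====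
def Spec_generate_input (n_scale : Int) (out : Int × Int × List Int) : Prop := out = generate_input_alt n_scale
instance (n_scale : Int) (out : Int × Int × List Int) : Decidable (Spec_generate_input n_scale out) := by unfold Spec_generate_input; infer_instance

-- ===== CLAIM (what is proved, stated in full; the proofs are below) =====
def Claim_equal_generate_input : Prop := ∀ (n_scale : Int), Dom_generate_input n_scale → Spec_generate_input n_scale (generate_input n_scale)

-- ===== LEMMAS AND PROOFS =====

-- value of the even-parity row / odd-parity row with M bits
def Erow (M : Nat) : Int := pvInt2 ((List.range M).map (fun k => if k % 2 == 0 then '1' else '0'))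
def Orow (M : Nat) : Int := pvInt2 ((List.range M).map (fun k => if k % 2 == 1 then '1' else '0'))

theorem foldl_append_singleton {α β : Type} (f : α → β) (l : List α) (acc : List β) :
    l.foldl (fun a i => a ++ [f i]) acc = acc ++ l.map f := by
  induction l generalizing acc with
  | nil => simp
  | cons x xs ih => simp [ih]

theorem Erow_succ (M : Nat) : Erow (M+1) = Erow M * 2 + (if M % 2 = 0 then 1 else 0) := by
  rcases Nat.mod_two_eq_zero_or_one M with h | h <;>
    simp [Erow, pvInt2, List.range_succ, h]

theorem Orow_succ (M : Nat) : Orow (M+1) = Orow M * 2 + (if M % 2 = 1 then 1 else 0) := by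
  rcases Nat.mod_two_eq_zero_or_one M with h | h <;>
    simp [Orow, pvInt2, List.range_succ, h]

theorem key (M : Nat) :
    3 * Erow M = 2^(M+1) - 2 + ((M % 2 : Nat) : Int) ∧
    Erow M = 2 * Orow M + ((M % 2 : Nat) : Int) := by
  induction M with
  | zero => simp [Erow, Orow, pvInt2]
  | succ M ih =>
    obtain ⟨h1, h2⟩ := ih
    rw [Erow_succ, Orow_succ]
    have hp : (2:Int)^(M+1+1) = 2 * 2^(M+1) := by ring
    rcases Nat.mod_two_eq_zero_or_one M with h | h <;>
      · have hm : (M+1) % 2 = 1 - M % 2 := by omega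
        simp [h, hm] at *
        omega

theorem dvd_four_pow_sub_one (k : Nat) : (3:Int) ∣ 4^k - 1 := by
  induction k with
  | zero => simp
  | succ k ih =>
    have : (4:Int)^(k+1) - 1 = 4 * (4^k - 1) + 3 := by ring
    rw [this]
    exact dvd_add (Dvd.dvd.mul_left ih 4) (dvd_refl 3)

theorem bits_even (i : Int) (h : i % 2 = 0) (k : Nat) :
    (if PySem.Int.mod (i + (0 + (k:Int))) 2 == 0 then '1' else '0')
      = (if k % 2 == 0 then '1' else '0') := by
  rw [PySem.Int.mod_eq_emod_of_pos (by norm_num)]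
  rcases Nat.mod_two_eq_zero_or_one k with hk | hk <;> simp [hk] <;> omega

theorem bits_odd (i : Int) (h : i % 2 = 1) (k : Nat) :
    (if PySem.Int.mod (i + (0 + (k:Int))) 2 == 0 then '1' else '0')
      = (if k % 2 == 1 then '1' else '0') := by
  rw [PySem.Int.mod_eq_emod_of_pos (by norm_num)]
  rcases Nat.mod_two_eq_zero_or_one k with hk | hk <;> simp [hk] <;> omega

-- B's closed form equals the even-row value
theorem v_even_eq (n : Int) (hn : 1 ≤ n) :
    PySem.Int.floordiv (2 ^ (2 * PySem.Int.floordiv (n + 1 + 1) 2).toNat - 1) 3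
      * 2 ^ (PySem.Int.mod (n + 1 - 1) 2).toNat = Erow (n + 1).toNat := by
  set M := (n + 1).toNat with hM
  obtain ⟨h1, -⟩ := key M
  rw [PySem.Int.mod_eq_emod_of_pos (by norm_num : (0:Int) < 2),
      PySem.Int.floordiv_eq_ediv_of_pos (by norm_num : (0:Int) < 3),
      PySem.Int.floordiv_eq_ediv_of_pos (by norm_num : (0:Int) < 2)]
  rcases Int.emod_two_eq n with h | h
  · -- n even, M odd: the division by 3 is exact on 2^(M+1) - 1
    have hK : (2 * ((n + 1 + 1) / 2)).toNat = M + 1 := by omega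
    have hr : ((n + 1 - 1) % 2).toNat = 0 := by omega
    have hM2 : (M % 2 : Nat) = 1 := by omega
    rw [hK, hr, pow_zero, mul_one]
    have h3 : (2:Int) ^ (M + 1) - 1 = 3 * Erow M := by rw [h1, hM2]; push_cast; ring
    rw [h3, Int.mul_ediv_cancel_left _ (by norm_num)]
  · -- n odd, M even: 3 divides 2^M - 1 = 4^(M/2) - 1
    have hK : (2 * ((n + 1 + 1) / 2)).toNat = M := by omega
    have hr : ((n + 1 - 1) % 2).toNat = 1 := by omega
    have hM2 : (M % 2 : Nat) = 0 := by omega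
    rw [hK, hr]
    obtain ⟨d, hd⟩ := dvd_four_pow_sub_one (M / 2)
    have h4 : (4:Int) ^ (M / 2) = 2 ^ M := by
      rw [show (4:Int) = 2 ^ 2 by norm_num, ← pow_mul]
      congr 1
      omega
    have hdv : (2:Int) ^ M - 1 = 3 * d := by rw [← h4]; exact hd
    have h1' : 3 * Erow M = 2 * (2:Int) ^ M - 2 := by
      rw [h1, hM2]; push_cast; ring
    rw [hdv, Int.mul_ediv_cancel_left _ (by norm_num)]
    have : Erow M = d * 2 := by linarith
    rw [this, pow_one]

theorem v_odd_eq (M : Nat) : PySem.Int.floordiv (Erow M) 2 = Orow M := by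
  obtain ⟨-, h2⟩ := key M
  rw [PySem.Int.floordiv_eq_ediv_of_pos (by norm_num), h2]
  omega

theorem generate_input_eq (n_scale : Int) :
    generate_input n_scale = generate_input_alt n_scale := by
  simp only [generate_input, generate_input_alt]
  set n := max 1 n_scale with hn'
  have hn : 1 ≤ n := le_max_left _ _
  rw [foldl_append_singleton]
  simp only [List.nil_append, Prod.mk.injEq, true_and]
  apply List.map_congr_left
  intro i hi
  rw [PySem.List.mem_pyRange_one] at hi
  obtain ⟨hi0, -⟩ := hi
  rw [PySem.List.pyRange_one 0 (n + 1), List.map_map]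
  simp only [sub_zero]
  rw [PySem.Int.mod_eq_emod_of_pos (by norm_num : (0:Int) < 2)]
  rcases Int.emod_two_eq i with h | h
  · rw [show ((fun j => if PySem.Int.mod (i + j) 2 == 0 then '1' else '0') ∘
        fun k : Nat => (0:Int) + ↑k) = (fun k : Nat => if k % 2 == 0 then '1' else '0')
      from funext (fun k => bits_even i h k)]
    simp only [h, beq_self_eq_true, if_true]
    exact (v_even_eq n hn).symm
  · rw [show ((fun j => if PySem.Int.mod (i + j) 2 == 0 then '1' else '0') ∘
        fun k : Nat => (0:Int) + ↑k) = (fun k : Nat => if k % 2 == 1 then '1' else '0')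
      from funext (fun k => bits_odd i h k)]
    have : ((1:Int) == 0) = false := by decide
    simp only [h, this, Bool.false_eq_true, if_false]
    rw [v_even_eq n hn, v_odd_eq]
    rfl

-- ===== VERDICT (by name: the statement is the Claim_ definition above) =====
theorem generate_input_spec : Claim_equal_generate_input := by
  intro n_scale _
  exact generate_input_eq n_scale
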